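-- pv_equiv track=rewrite | github.com/codesquad-backend-study/daily-algorithm-challenge | Sully/baekjoon/B1929.py | solution
-- ===== SOURCE A (Python) =====
-- import collections
-- from typing import List
--
-- def solution(A: List[int], B: List[int]) -> List[int]:
--     answer = []
--
--     # A에 담긴 수들을 해시 테이블에 저장
--     # {수: 1}
--     A_map = collections.defaultdict()
--     for a in A:
--         A_map[a] = 1
--
--     for b in B:
--         if b in A_map:
--             answer.append(1)
--             continue
--
--         answer.append(0)
--
--     return answer
-- ===== SOURCE B (Python) =====
-- from typing import List
--
-- def solution(A: List[int], B: List[int]) -> List[int]: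
--     # Sorted copy of A + hand-written binary search instead of a hash table.
--     arr = sorted(A)
--     answer = []
--     for b in B:
--         lo, hi = 0, len(arr)
--         while lo < hi:
--             mid = (lo + hi) // 2
--             if arr[mid] < b:
--                 lo = mid + 1
--             else:
--                 hi = mid
--         answer.append(1 if lo < len(arr) and arr[lo] == b else 0)
--     return answer
-- ===== Notes on version B (the rewrite author's own statement) =====
-- stated objective: alternative
-- what changed: Replaces the defaultdict hash-table membership with a sorted copy of A plus a hand-written binary search (bisect_left style) per query.
import Mathlib
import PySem

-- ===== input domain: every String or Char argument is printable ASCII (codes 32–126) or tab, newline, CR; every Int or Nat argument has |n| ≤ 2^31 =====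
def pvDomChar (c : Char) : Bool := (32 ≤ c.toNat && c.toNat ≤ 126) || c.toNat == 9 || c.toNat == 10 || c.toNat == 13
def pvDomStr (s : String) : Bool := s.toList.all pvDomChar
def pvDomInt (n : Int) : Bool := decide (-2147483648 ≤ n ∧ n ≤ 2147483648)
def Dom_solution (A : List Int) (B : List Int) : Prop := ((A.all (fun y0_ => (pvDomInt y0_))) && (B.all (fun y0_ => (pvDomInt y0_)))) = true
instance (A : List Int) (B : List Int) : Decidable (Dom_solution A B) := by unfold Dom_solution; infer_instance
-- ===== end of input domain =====

-- B replaces A's hash-table membership with a sorted copy of A plus a binary search per query (alternative lookup structure, same results).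

-- ===== PORT A =====
def solution (A : List Int) (B : List Int) : List Int :=
  let Amap : PySem.Dict Int Int := A.foldl (fun d a => d.insert a 1) PySem.Dict.empty
  B.foldl (fun answer b =>
    if Amap.contains b then answer ++ [1] else answer ++ [0]) []

-- ===== PORT B =====
-- the while loop 'lo, hi = 0, len(arr); while lo < hi: …' of Source B; arr[mid] is
-- exact as arr.getD mid 0 because mid < hi ≤ arr.length throughout the loop.
def bsearchLoop (arr : List Int) (b : Int) (lo hi : Nat) : Nat :=
  if _h : lo < hi then
    let mid := (lo + hi) / 2
    if arr.getD mid 0 < b then bsearchLoop arr b (mid + 1) hi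
    else bsearchLoop arr b lo mid
  else lo
termination_by hi - lo
decreasing_by all_goals omega

def solution_alt (A : List Int) (B : List Int) : List Int :=
  let arr := PySem.List.sorted A (fun x => x) false
  B.foldl (fun answer b =>
    let lo := bsearchLoop arr b 0 arr.length
    answer ++ [if lo < arr.length ∧ arr.getD lo 0 = b then 1 else 0]) []

-- ===== PRECONDITION & SPEC =====
def Spec_solution (A : List Int) (B : List Int) (out : List Int) : Prop := out = solution_alt A B
instance (A : List Int) (B : List Int) (out : List Int) : Decidable (Spec_solution A B out) := by unfold Spec_solution; infer_instance

-- ===== CLAIM (what is proved, stated in full; the proofs are below) =====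
def Claim_equal_solution : Prop := ∀ (A : List Int) (B : List Int), Dom_solution A B → Spec_solution A B (solution A B)

-- ===== LEMMAS AND PROOFS =====

-- loop invariant of the binary search: everything left of the result is < b,
-- everything from the result on is ≥ b (for a list monotone under getD).
lemma bsearch_inv (arr : List Int) (b : Int)
    (hmono : ∀ i j, i ≤ j → j < arr.length → arr.getD i 0 ≤ arr.getD j 0) :
    ∀ n lo hi, hi - lo ≤ n → lo ≤ hi → hi ≤ arr.length →
      (∀ j, j < lo → arr.getD j 0 < b) →
      (∀ j, hi ≤ j → j < arr.length → b ≤ arr.getD j 0) →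
      bsearchLoop arr b lo hi ≤ arr.length ∧
      (∀ j, j < bsearchLoop arr b lo hi → arr.getD j 0 < b) ∧
      (∀ j, bsearchLoop arr b lo hi ≤ j → j < arr.length → b ≤ arr.getD j 0) := by
  intro n
  induction n with
  | zero =>
    intro lo hi hfuel hlohi hlen h1 h2
    have hnl : ¬ lo < hi := by omega
    rw [bsearchLoop, dif_neg hnl]
    exact ⟨by omega, h1, fun j hj hjl => h2 j (by omega) hjl⟩
  | succ n ih =>
    intro lo hi hfuel hlohi hlen h1 h2
    by_cases hlt : lo < hi
    · rw [bsearchLoop, dif_pos hlt]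
      simp only
      by_cases hc : arr.getD ((lo + hi) / 2) 0 < b
      · rw [if_pos hc]
        refine ih ((lo + hi) / 2 + 1) hi (by omega) (by omega) hlen ?_ h2
        intro j hj
        exact lt_of_le_of_lt (hmono j ((lo + hi) / 2) (by omega) (by omega)) hc
      · rw [if_neg hc]
        refine ih lo ((lo + hi) / 2) (by omega) (by omega) (by omega) h1 ?_
        intro j hj hjl
        exact le_trans (le_of_not_gt hc) (hmono ((lo + hi) / 2) j hj hjl)
    · rw [bsearchLoop, dif_neg hlt]
      exact ⟨by omega, h1, fun j hj hjl => h2 j (by omega) hjl⟩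

-- the binary-search membership test decides list membership on a monotone list
lemma bsearch_mem (arr : List Int) (b : Int)
    (hmono : ∀ i j, i ≤ j → j < arr.length → arr.getD i 0 ≤ arr.getD j 0) :
    (bsearchLoop arr b 0 arr.length < arr.length ∧
      arr.getD (bsearchLoop arr b 0 arr.length) 0 = b) ↔ b ∈ arr := by
  obtain ⟨hle, hlt, hge⟩ := bsearch_inv arr b hmono (arr.length) 0 arr.length
    (by omega) (by omega) (le_refl _) (by omega) (by omega)
  set r := bsearchLoop arr b 0 arr.length with hr
  constructor
  · rintro ⟨hrl, hrb⟩
    rw [← hrb]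
    rw [List.getD_eq_getElem arr 0 hrl]
    exact List.getElem_mem hrl
  · intro hmem
    obtain ⟨k, hk, hkb⟩ := List.mem_iff_getElem.mp hmem
    have hkD : arr.getD k 0 = b := by rw [List.getD_eq_getElem arr 0 hk]; exact hkb
    have hkr : ¬ k < r := fun h => absurd hkD (ne_of_lt (hlt k h))
    have hrl : r < arr.length := by omega
    refine ⟨hrl, le_antisymm ?_ (hge r (le_refl _) hrl)⟩
    calc arr.getD r 0 ≤ arr.getD k 0 := hmono r k (by omega) hk
    _ = b := hkD

-- the sorted copy of A is getD-monotone
lemma sorted_mono (A : List Int) :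
    ∀ i j, i ≤ j → j < (PySem.List.sorted A (fun x => x) false).length →
      (PySem.List.sorted A (fun x => x) false).getD i 0 ≤
      (PySem.List.sorted A (fun x => x) false).getD j 0 := by
  intro i j hij hj
  rcases eq_or_lt_of_le hij with rfl | hlt
  · exact le_refl _
  · have hp := PySem.List.sorted_pairwise (xs := A) (key := fun x => x)
    rw [List.pairwise_iff_getElem] at hp
    rw [List.getD_eq_getElem _ 0 (by omega), List.getD_eq_getElem _ 0 hj]
    exact hp i j (by omega) hj hlt

-- the dict built by A's first loop contains exactly the elements of A
lemma dict_contains (A : List Int) (b : Int) :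
    (A.foldl (fun d a => d.insert a (1 : Int)) PySem.Dict.empty).contains b = true ↔ b ∈ A := by
  rw [PySem.Dict.contains_iff_mem_keys, PySem.Dict.keys_foldl_insert]
  simp [PySem.Set.mem_update, PySem.Dict.keys_empty]

-- ===== VERDICT (by name: the statement is the Claim_ definition above) =====
theorem solution_spec : Claim_equal_solution := by
  intro A B _
  unfold Spec_solution solution solution_alt
  simp only
  have hfun : (fun (answer : List Int) (b : Int) =>
      if (A.foldl (fun d a => d.insert a (1 : Int)) PySem.Dict.empty).contains b
      then answer ++ [1] else answer ++ [0]) =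
      (fun (answer : List Int) (b : Int) =>
      answer ++ [if (A.foldl (fun d a => d.insert a (1 : Int)) PySem.Dict.empty).contains b
                 then (1 : Int) else 0]) := by
    funext ans b; split <;> rfl
  rw [hfun, PySem.List.foldl_append_singleton_eq_map, PySem.List.foldl_append_singleton_eq_map]
  simp only [List.nil_append]
  apply List.map_congr_left
  intro b _
  have hiff : ((A.foldl (fun d a => d.insert a (1 : Int)) PySem.Dict.empty).contains b = true) ↔
      (bsearchLoop (PySem.List.sorted A (fun x => x) false) b 0
          (PySem.List.sorted A (fun x => x) false).length <
        (PySem.List.sorted A (fun x => x) false).length ∧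
        (PySem.List.sorted A (fun x => x) false).getD
          (bsearchLoop (PySem.List.sorted A (fun x => x) false) b 0
            (PySem.List.sorted A (fun x => x) false).length) 0 = b) := by
    rw [dict_contains, bsearch_mem _ _ (sorted_mono A), PySem.List.mem_sorted]
  simp only [hiff]
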